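-- pv_equiv track=rewrite | github.com/rmarcisz/Advent_of_Code | 2024/.ipynb_checkpoints/untitled3-checkpoint.py | is_binary_tree
-- ===== SOURCE A (Python) =====
-- from collections import defaultdict
--
-- def is_binary_tree(edges):
--     child_count = defaultdict(int)
--     parent_map = defaultdict(list)
--     nodes = set()
--
--     # Step 1: Process edges and count children
--     for parent, child in edges:
--         parent_map[parent].append(child)
--         child_count[child] += 1
--         nodes.add(parent)
--         nodes.add(child)
--
--         # Check if any node has more than one parent
--         if child_count[child] > 1:
--             return False  # A node has multiple parents, not a tree
--     # Step 2: Find the root (should be exactly one)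
--     root_candidates = nodes - set(child_count.keys())  # Nodes that are never children
--     if len(root_candidates) != 1:
--         return False  # Either no root or multiple roots
--     root = root_candidates.pop()
--     # Step 3: Check for cycles and connectivity using DFS
--     visited = set()
--     def dfs(node):
--         if node in visited:
--             return False  # Cycle detected
--         visited.add(node)
--         for child in parent_map[node]:
--             if not dfs(child):
--                 return False
--         return True
--
--     if not dfs(root):
--         return False  # Cycle detected
--
--     # Step 4: Ensure all nodes are connected
--     return len(visited) == len(nodes)  # All nodes must be reachable from root
-- ===== SOURCE B (Python) =====
-- def is_binary_tree(edges):
--     child_count = {}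
--     parent_map = {}
--     nodes = set()
--
--     # Step 1: process edges, count children, early exit on a multi-parent node
--     for parent, child in edges:
--         parent_map.setdefault(parent, []).append(child)
--         child_count[child] = child_count.get(child, 0) + 1
--         nodes.add(parent)
--         nodes.add(child)
--         if child_count[child] > 1:
--             return False
--
--     # Step 2: exactly one root (a node that is never a child)
--     root_candidates = nodes - set(child_count)
--     if len(root_candidates) != 1:
--         return False
--
--     # Step 3: iterative DFS with an explicit stack (children pushed reversed
--     # to keep the recursive left-to-right visiting order)
--     visited = set()
--     stack = [root_candidates.pop()]
--     while stack:
--         node = stack.pop()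
--         if node in visited:
--             return False
--         visited.add(node)
--         stack.extend(reversed(parent_map.get(node, [])))
--
--     # Step 4: all nodes reachable from the root
--     return len(visited) == len(nodes)
-- ===== Notes on version B (the rewrite author's own statement) =====
-- stated objective: alternative
-- what changed: The recursive inner dfs (call-stack recursion with early returns) is replaced by an iterative depth-first traversal with an explicit stack and a visited set; the edge pass and root-finding keep their role but use plain dicts with setdefault/get instead of defaultdict.
import Mathlib
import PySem

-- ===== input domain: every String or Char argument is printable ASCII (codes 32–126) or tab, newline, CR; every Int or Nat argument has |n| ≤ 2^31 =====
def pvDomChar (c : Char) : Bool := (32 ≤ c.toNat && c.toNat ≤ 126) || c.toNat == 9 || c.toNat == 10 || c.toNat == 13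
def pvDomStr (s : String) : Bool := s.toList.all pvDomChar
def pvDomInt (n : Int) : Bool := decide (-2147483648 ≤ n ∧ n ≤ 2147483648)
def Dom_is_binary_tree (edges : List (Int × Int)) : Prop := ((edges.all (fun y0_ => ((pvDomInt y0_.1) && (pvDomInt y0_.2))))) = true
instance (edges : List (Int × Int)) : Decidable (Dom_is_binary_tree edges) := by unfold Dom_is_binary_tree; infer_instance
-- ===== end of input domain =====

-- B replaces A's recursive inner dfs by an explicit-stack iterative DFS (same edge pass
-- and root-finding); objective: alternative decomposition, identical return value.

-- ===== PORT A =====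
-- Step 1 of A: one pass over the edges building (child_count, parent_map, nodes);
-- `none` models the early `return False` on a node with a second parent.
def pvStep1A (edges : List (Int × Int)) :
    Option (PySem.Dict Int Int × PySem.Dict Int (List Int) × PySem.Set Int) :=
  edges.foldl
    (fun acc pc =>
      match acc with
      | none => none
      | some (cc, pm, nd) =>
        let pm := pm.modify pc.1 [] (· ++ [pc.2])
        let cc := cc.modify pc.2 0 (· + 1)
        let nd := PySem.Set.add (PySem.Set.add nd pc.1) pc.2
        if cc.getD pc.2 0 > 1 then none else some (cc, pm, nd))
    (some (PySem.Dict.empty, PySem.Dict.empty, PySem.Set.empty))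

-- A's recursive dfs, fuelled for termination (fuel bounds the recursion depth; each
-- nested call starts from a visited set enlarged by a fresh key, so `pm.keys.length + 1`
-- is enough — pvDfsA_ne_none below).  The inner foldl is the `for child in
-- parent_map[node]` loop, Python's early `return False` carried as the Bool of the state.
def pvDfsA (pm : PySem.Dict Int (List Int)) :
    Nat → PySem.Set Int → Int → Option (Bool × PySem.Set Int)
  | 0, _, _ => none
  | f + 1, v, u =>
    if u ∈ v then some (false, v)
    else
      (pm.getD u []).foldl
        (fun acc c =>
          match acc with
          | some (true, v') => pvDfsA pm f v' c
          | other => other)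
        (some (true, PySem.Set.add v u))

def is_binary_tree (edges : List (Int × Int)) : Bool :=
  match pvStep1A edges with
  | none => false
  | some (cc, pm, nd) =>
    -- Step 2: root_candidates = nodes - set(child_count.keys()); its size must be 1
    match PySem.Set.diff nd (PySem.Set.ofList cc.keys) with
    | [root] =>
      -- Step 3/4: dfs from the root, then len(visited) == len(nodes)
      match pvDfsA pm (pm.keys.length + 1) PySem.Set.empty root with
      | none => false  -- fuel exhaustion: unreachable (pvDfsA_ne_none below)
      | some (b, vis) => if b then decide (vis.length = nd.length) else false
    | _ => false

-- ===== PORT B =====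
-- Step 1 of B (setdefault/get in Source B): the same pass with insert-style updates.
def pvStep1B (edges : List (Int × Int)) :
    Option (PySem.Dict Int Int × PySem.Dict Int (List Int) × PySem.Set Int) :=
  edges.foldl
    (fun acc pc =>
      match acc with
      | none => none
      | some (cc, pm, nd) =>
        let pm := pm.insert pc.1 (pm.getD pc.1 [] ++ [pc.2])
        let cc := cc.insert pc.2 (cc.getD pc.2 0 + 1)
        let nd := PySem.Set.add (PySem.Set.add nd pc.1) pc.2
        if cc.getD pc.2 0 > 1 then none else some (cc, pm, nd))
    (some (PySem.Dict.empty, PySem.Dict.empty, PySem.Set.empty))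

-- cited by pvLoopB's termination proof
lemma pvGetD_not_key (pm : PySem.Dict Int (List Int)) (u : Int) (h : u ∉ pm.keys) :
    pm.getD u [] = [] := by
  apply PySem.Dict.getD_of_not_contains
  rw [← Bool.not_eq_true, PySem.Dict.contains_iff_mem_keys]
  exact h

-- B's while-loop.  The Python stack pops from the END and pushes `reversed(children)`,
-- so the next node popped is the FIRST child: with the list head as top of the stack
-- that is exactly `children ++ rest`.  (false, v) models the early `return False` on a
-- revisit.  Total: each step either visits a fresh key of pm or shortens the stack.
def pvLoopB (pm : PySem.Dict Int (List Int)) (v : PySem.Set Int) (stack : List Int) :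
    Bool × PySem.Set Int :=
  match stack with
  | [] => (true, v)
  | u :: rest =>
    if h : u ∈ v then (false, v)
    else pvLoopB pm (PySem.Set.add v u) (pm.getD u [] ++ rest)
termination_by ((pm.keys.toFinset \ v.toFinset).card, stack.length)
decreasing_by
  by_cases hk : u ∈ pm.keys
  · apply Prod.Lex.left
    apply Finset.card_lt_card
    constructor
    · apply Finset.sdiff_subset_sdiff (Finset.Subset.refl _)
      simp [PySem.Set.add_of_not_mem h]
    · intro hsub
      have hu : u ∈ pm.keys.toFinset \ v.toFinset := by
        simp [List.mem_toFinset, hk, h]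
      have h2 := hsub hu
      simp [PySem.Set.add_of_not_mem h, List.mem_toFinset] at h2
  · have hv : (PySem.Set.add v u).toFinset = insert u v.toFinset := by
      simp [PySem.Set.add_of_not_mem h, List.toFinset_append]
    have hcd : pm.keys.toFinset \ (PySem.Set.add v u).toFinset
        = pm.keys.toFinset \ v.toFinset := by
      rw [hv]
      ext x
      simp only [Finset.mem_sdiff, Finset.mem_insert, List.mem_toFinset]
      constructor
      · rintro ⟨hx, hx2⟩; exact ⟨hx, fun hxv => hx2 (Or.inr hxv)⟩
      · rintro ⟨hx, hx2⟩
        refine ⟨hx, fun hor => ?_⟩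
        rcases hor with rfl | hxv
        · exact hk hx
        · exact hx2 hxv
    rw [pvGetD_not_key pm u hk]
    rw [hcd]
    exact Prod.Lex.right _ (by simp)

def is_binary_tree_alt (edges : List (Int × Int)) : Bool :=
  match pvStep1B edges with
  | some (cc, pm, nd) =>
    match PySem.Set.diff nd (PySem.Set.ofList cc.keys) with
    | root :: rest =>
      if rest.isEmpty then
        let r := pvLoopB pm PySem.Set.empty [root]
        if r.1 then decide (r.2.length = nd.length) else false
      else false
    | [] => false
  | none => false

-- ===== PRECONDITION & SPEC =====
def Spec_is_binary_tree (edges : List (Int × Int)) (out : Bool) : Prop := out = is_binary_tree_alt edges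
instance (edges : List (Int × Int)) (out : Bool) : Decidable (Spec_is_binary_tree edges out) := by unfold Spec_is_binary_tree; infer_instance

-- ===== CLAIM (what is proved, stated in full; the proofs are below) =====
def Claim_equal_is_binary_tree : Prop := ∀ (edges : List (Int × Int)), Dom_is_binary_tree edges → Spec_is_binary_tree edges (is_binary_tree edges)

-- ===== LEMMAS AND PROOFS =====

-- The two edge passes are the same computation (Dict.modify k d f = insert k (f (getD k d))).
lemma pvStep1_eq (edges : List (Int × Int)) : pvStep1A edges = pvStep1B edges := rfl

-- the body of A's `for child in parent_map[node]` loop, named for the proofs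
def pvStep (pm : PySem.Dict Int (List Int)) (f : Nat) :
    Option (Bool × PySem.Set Int) → Int → Option (Bool × PySem.Set Int) :=
  fun acc c =>
    match acc with
    | some (true, v') => pvDfsA pm f v' c
    | other => other

lemma pvDfsA_succ (pm : PySem.Dict Int (List Int)) (f : Nat) (v : PySem.Set Int) (u : Int) :
    pvDfsA pm (f + 1) v u =
      if u ∈ v then some (false, v)
      else (pm.getD u []).foldl (pvStep pm f) (some (true, PySem.Set.add v u)) := rfl

lemma pvFold_none (pm : PySem.Dict Int (List Int)) (f : Nat) (l : List Int) :
    l.foldl (pvStep pm f) none = none := by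
  induction l with
  | nil => rfl
  | cons c cs ih => exact ih

lemma pvFold_false (pm : PySem.Dict Int (List Int)) (f : Nat) (l : List Int) (v : PySem.Set Int) :
    l.foldl (pvStep pm f) (some (false, v)) = some (false, v) := by
  induction l with
  | nil => rfl
  | cons c cs ih => exact ih

-- the visited set only grows along A's dfs
lemma pvDfsA_mono (pm : PySem.Dict Int (List Int)) :
    ∀ f v u b v', pvDfsA pm f v u = some (b, v') → v.toFinset ⊆ v'.toFinset := by
  intro f
  induction f with
  | zero => intro v u b v' h; simp [pvDfsA] at h
  | succ f ih =>
    have ml : ∀ (l : List Int) (v : PySem.Set Int) (b : Bool) (v' : PySem.Set Int), l.foldl (pvStep pm f) (some (true, v)) = some (b, v') →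
        v.toFinset ⊆ v'.toFinset := by
      intro l
      induction l with
      | nil =>
        intro v b v' h
        simp only [List.foldl_nil, Option.some.injEq, Prod.mk.injEq] at h
        rw [← h.2]
      | cons c cs ihl =>
        intro v b v' h
        rw [List.foldl_cons, show pvStep pm f (some (true, v)) c = pvDfsA pm f v c from rfl] at h
        cases hc : pvDfsA pm f v c with
        | none => rw [hc, pvFold_none] at h; cases h
        | some r =>
          obtain ⟨b1, v1⟩ := r
          rw [hc] at h
          cases b1 with
          | false =>
            rw [pvFold_false] at h
            simp only [Option.some.injEq, Prod.mk.injEq] at h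
            rw [← h.2]
            exact ih v c false v1 hc
          | true => exact (ih v c true v1 hc).trans (ihl v1 b v' h)
    intro v u b v' h
    rw [pvDfsA_succ] at h
    by_cases hm : u ∈ v
    · rw [if_pos hm] at h
      simp only [Option.some.injEq, Prod.mk.injEq] at h
      rw [← h.2]
    · rw [if_neg hm] at h
      refine Finset.Subset.trans ?_ (ml _ _ b v' h)
      intro x hx
      rw [List.mem_toFinset] at hx ⊢
      exact (PySem.Set.mem_add v u x).mpr (Or.inl hx)

-- fuel `pm.keys.length + 1` never runs out
lemma pvDfsA_ne_none (pm : PySem.Dict Int (List Int)) :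
    ∀ f v u, (pm.keys.toFinset \ v.toFinset).card < f → pvDfsA pm f v u ≠ none := by
  intro f
  induction f with
  | zero => intro v u h; exact absurd h (Nat.not_lt_zero _)
  | succ f ih =>
    have fl : ∀ (l : List Int) (v : PySem.Set Int), (pm.keys.toFinset \ v.toFinset).card < f →
        l.foldl (pvStep pm f) (some (true, v)) ≠ none := by
      intro l
      induction l with
      | nil => intro v _ h; cases h
      | cons c cs ihl =>
        intro v hv
        rw [List.foldl_cons, show pvStep pm f (some (true, v)) c = pvDfsA pm f v c from rfl]
        cases hc : pvDfsA pm f v c with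
        | none => exact absurd hc (ih v c hv)
        | some r =>
          obtain ⟨b1, v1⟩ := r
          cases b1 with
          | false => rw [pvFold_false]; simp
          | true =>
            apply ihl v1
            calc (pm.keys.toFinset \ v1.toFinset).card
                ≤ (pm.keys.toFinset \ v.toFinset).card := by
                  apply Finset.card_le_card
                  exact Finset.sdiff_subset_sdiff (Finset.Subset.refl _) (pvDfsA_mono pm f v c true v1 hc)
              _ < f := hv
    intro v u hv
    rw [pvDfsA_succ]
    by_cases hm : u ∈ v
    · simp [hm]
    · rw [if_neg hm]
      by_cases hk : u ∈ pm.keys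
      · apply fl
        have hadd : (PySem.Set.add v u).toFinset = insert u v.toFinset := by
          simp [PySem.Set.add_of_not_mem hm, List.toFinset_append]
        have hu : u ∈ pm.keys.toFinset \ v.toFinset := by
          simp [List.mem_toFinset, hk, hm]
        have h1 : pm.keys.toFinset \ (PySem.Set.add v u).toFinset
            = (pm.keys.toFinset \ v.toFinset).erase u := by
          rw [hadd]
          ext x
          simp only [Finset.mem_sdiff, Finset.mem_insert, Finset.mem_erase]
          constructor
          · rintro ⟨hx, hx2⟩
            exact ⟨fun hxu => hx2 (Or.inl hxu), hx, fun hxv => hx2 (Or.inr hxv)⟩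
          · rintro ⟨hne, hx, hx2⟩
            refine ⟨hx, fun hor => ?_⟩
            rcases hor with rfl | hxv
            · exact hne rfl
            · exact hx2 hxv
        rw [h1, Finset.card_erase_of_mem hu]
        have hpos : 1 ≤ (pm.keys.toFinset \ v.toFinset).card :=
          Finset.card_pos.mpr ⟨u, hu⟩
        omega
      · rw [pvGetD_not_key pm u hk]
        simp

-- the defunctionalization bridge: A's recursive dfs drives B's stack loop
lemma pvBridge (pm : PySem.Dict Int (List Int)) :
    ∀ f v u b v', pvDfsA pm f v u = some (b, v') →
      ∀ K, pvLoopB pm v (u :: K) = if b then pvLoopB pm v' K else (false, v') := by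
  intro f
  induction f with
  | zero => intro v u b v' h; simp [pvDfsA] at h
  | succ f ih =>
    have tl : ∀ (l : List Int) (v : PySem.Set Int) (b : Bool) (v' : PySem.Set Int), l.foldl (pvStep pm f) (some (true, v)) = some (b, v') →
        ∀ K, pvLoopB pm v (l ++ K) = if b then pvLoopB pm v' K else (false, v') := by
      intro l
      induction l with
      | nil =>
        intro v b v' h K
        simp only [List.foldl_nil, Option.some.injEq, Prod.mk.injEq] at h
        rw [← h.1, ← h.2, List.nil_append, if_pos rfl]
      | cons c cs ihl =>
        intro v b v' h K
        rw [List.foldl_cons, show pvStep pm f (some (true, v)) c = pvDfsA pm f v c from rfl] at h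
        rw [List.cons_append]
        cases hc : pvDfsA pm f v c with
        | none => rw [hc, pvFold_none] at h; cases h
        | some r =>
          obtain ⟨b1, v1⟩ := r
          rw [hc] at h
          have hl := ih v c b1 v1 hc (cs ++ K)
          cases b1 with
          | false =>
            rw [pvFold_false] at h
            simp only [Option.some.injEq, Prod.mk.injEq] at h
            rw [hl, ← h.1, ← h.2]
            simp
          | true =>
            rw [hl, if_pos rfl]
            exact ihl v1 b v' h K
    intro v u b v' h K
    rw [pvDfsA_succ] at h
    by_cases hm : u ∈ v
    · rw [if_pos hm] at h
      simp only [Option.some.injEq, Prod.mk.injEq] at h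
      rw [← h.1, ← h.2]
      rw [pvLoopB]
      simp [hm]
    · rw [if_neg hm] at h
      have htl := tl _ _ b v' h K
      rw [pvLoopB]
      simp only [dif_neg hm]
      exact htl

lemma pvLoopB_nil (pm : PySem.Dict Int (List Int)) (v : PySem.Set Int) :
    pvLoopB pm v [] = (true, v) := by
  rw [pvLoopB]

-- ===== VERDICT (by name: the statement is the Claim_ definition above) =====
theorem is_binary_tree_spec : Claim_equal_is_binary_tree := by
  intro edges _
  show is_binary_tree edges = is_binary_tree_alt edges
  unfold is_binary_tree is_binary_tree_alt
  rw [pvStep1_eq]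
  cases hst : pvStep1B edges with
  | none => rfl
  | some s =>
    obtain ⟨cc, pm, nd⟩ := s
    dsimp only
    cases hr : PySem.Set.diff nd (PySem.Set.ofList cc.keys) with
    | nil => rfl
    | cons root rest =>
      cases rest with
      | cons a l => rfl
      | nil =>
        dsimp only
        have hcard : (pm.keys.toFinset \ (PySem.Set.empty : PySem.Set Int).toFinset).card
            < pm.keys.length + 1 := by
          have he : (PySem.Set.empty : PySem.Set Int).toFinset = ∅ := rfl
          rw [he, Finset.sdiff_empty]
          exact Nat.lt_succ_of_le (List.toFinset_card_le _)
        obtain ⟨r, hd⟩ := Option.ne_none_iff_exists'.mp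
          (pvDfsA_ne_none pm (pm.keys.length + 1) PySem.Set.empty root hcard)
        obtain ⟨b, vis⟩ := r
        have hres : pvLoopB pm PySem.Set.empty [root] = (b, vis) := by
          rw [pvBridge pm _ _ _ _ _ hd []]
          cases b
          · rfl
          · rw [if_pos rfl, pvLoopB_nil]
        rw [hd, hres]
        cases b <;> rfl
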